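-- pv_equiv track=rewrite | github.com/dylanjkennedy/GameDataMiner | GameDataMiner.py | get_rush_plays
-- ===== SOURCE A (Python) =====
-- def get_rush_plays(plays, winner, loser):
--     rush_plays = [0, 0]
--     for play in plays:
--         if play['run_pass'] == 'R':
--             if play['offense'] == winner:
--                 rush_plays[0] += 1
--             else:
--                 rush_plays[1] += 1
--     return rush_plays
-- ===== SOURCE B (Python) =====
-- def get_rush_plays(plays, winner, loser):
--     total = sum(1 for play in plays if play['run_pass'] == 'R')
--     won = sum(1 for play in plays
--               if play['run_pass'] == 'R' and play['offense'] == winner)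
--     return [won, total - won]
-- ===== Notes on version B (the rewrite author's own statement) =====
-- stated objective: alternative
-- what changed: Replaced the single branching accumulation over a two-cell list by two counting passes (total rush plays, and rush plays with offense == winner) with the loser count derived arithmetically as total - won.
import Mathlib
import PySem

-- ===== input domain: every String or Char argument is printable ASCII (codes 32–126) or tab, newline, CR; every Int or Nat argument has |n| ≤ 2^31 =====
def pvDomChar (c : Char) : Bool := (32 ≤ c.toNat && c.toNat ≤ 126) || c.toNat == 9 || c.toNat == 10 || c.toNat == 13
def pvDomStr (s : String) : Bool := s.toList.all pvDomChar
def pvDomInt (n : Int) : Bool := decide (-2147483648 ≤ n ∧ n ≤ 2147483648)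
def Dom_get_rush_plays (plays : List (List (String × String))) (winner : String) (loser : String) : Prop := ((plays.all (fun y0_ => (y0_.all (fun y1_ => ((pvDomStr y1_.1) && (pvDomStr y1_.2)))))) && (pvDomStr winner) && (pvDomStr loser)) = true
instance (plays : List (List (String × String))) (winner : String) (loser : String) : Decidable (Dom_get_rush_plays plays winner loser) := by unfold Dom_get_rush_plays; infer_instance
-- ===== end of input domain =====

-- B replaces A's single branching pass over a two-cell counter by two counting
-- passes (all rush plays, and rush plays won by `winner`) with the loser count
-- obtained as total - won; objective: alternative decomposition, same cost.


-- ===== PORT A =====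
-- rush_plays = [0, 0], updated in place; ported as an Int × Int accumulator,
-- returned as the two-element list.  play['x'] is Dict.getD under Pre_ (key present).
def get_rush_plays (plays : List (List (String × String))) (winner : String) (loser : String) : List Int :=
  let rp := plays.foldl
    (fun (rp : Int × Int) play =>
      if PySem.Dict.getD ⟨play⟩ "run_pass" "" == "R" then
        if PySem.Dict.getD ⟨play⟩ "offense" "" == winner then (rp.1 + 1, rp.2)
        else (rp.1, rp.2 + 1)
      else rp)
    (0, 0)
  [rp.1, rp.2]

-- ===== PORT B =====
-- two counting passes (the generator-sums of Source B, ported as countP), loser = total - won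
def get_rush_plays_alt (plays : List (List (String × String))) (winner : String) (loser : String) : List Int :=
  let total : Int := plays.countP (fun play => PySem.Dict.getD ⟨play⟩ "run_pass" "" == "R")
  let won : Int := plays.countP (fun play =>
    PySem.Dict.getD ⟨play⟩ "run_pass" "" == "R" && PySem.Dict.getD ⟨play⟩ "offense" "" == winner)
  [won, total - won]

-- ===== PRECONDITION & SPEC =====
-- Pre_ excludes exactly the inputs where Python raises KeyError: a play without a
-- 'run_pass' key, or a rush play ('R') without an 'offense' key.
def Pre_get_rush_plays (plays : List (List (String × String))) (winner : String) (loser : String) : Prop :=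
  ∀ play ∈ plays, (PySem.Dict.get? (⟨play⟩ : PySem.Dict String String) "run_pass").isSome = true ∧
    (PySem.Dict.get? (⟨play⟩ : PySem.Dict String String) "run_pass" = some "R" → (PySem.Dict.get? (⟨play⟩ : PySem.Dict String String) "offense").isSome = true)
instance (plays : List (List (String × String))) (winner : String) (loser : String) : Decidable (Pre_get_rush_plays plays winner loser) := by unfold Pre_get_rush_plays; infer_instance

def pvWitness_get_rush_plays : (List (List (String × String))) × String × String :=
  ([[("run_pass", "R"), ("offense", "ND")], [("run_pass", "P")]], "ND", "USC")

def Spec_get_rush_plays (plays : List (List (String × String))) (winner : String) (loser : String) (out : List Int) : Prop := out = get_rush_plays_alt plays winner loser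
instance (plays : List (List (String × String))) (winner : String) (loser : String) (out : List Int) : Decidable (Spec_get_rush_plays plays winner loser out) := by unfold Spec_get_rush_plays; infer_instance

-- ===== CLAIM (what is proved, stated in full; the proofs are below) =====
def Claim_equal_get_rush_plays : Prop := ∀ (plays : List (List (String × String))) (winner : String) (loser : String), Dom_get_rush_plays plays winner loser → Pre_get_rush_plays plays winner loser → Spec_get_rush_plays plays winner loser (get_rush_plays plays winner loser)

-- ===== LEMMAS AND PROOFS =====

-- A's fold, started from any (a, b), lands on (a + won, b + (total - won)).
theorem get_rush_plays_fold (winner : String)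
    (plays : List (List (String × String))) (a b : Int) :
    plays.foldl
      (fun (rp : Int × Int) play =>
        if PySem.Dict.getD ⟨play⟩ "run_pass" "" == "R" then
          if PySem.Dict.getD ⟨play⟩ "offense" "" == winner then (rp.1 + 1, rp.2)
          else (rp.1, rp.2 + 1)
        else rp)
      (a, b)
    = (a + (plays.countP (fun play =>
          PySem.Dict.getD ⟨play⟩ "run_pass" "" == "R" &&
          PySem.Dict.getD ⟨play⟩ "offense" "" == winner) : Int),
       b + ((plays.countP (fun play => PySem.Dict.getD ⟨play⟩ "run_pass" "" == "R") : Int)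
            - (plays.countP (fun play =>
                PySem.Dict.getD ⟨play⟩ "run_pass" "" == "R" &&
                PySem.Dict.getD ⟨play⟩ "offense" "" == winner) : Int))) := by
  induction plays generalizing a b with
  | nil => simp
  | cons p ps ih =>
    by_cases hR : (PySem.Dict.getD ⟨p⟩ "run_pass" "" == "R") = true
    · by_cases hW : (PySem.Dict.getD ⟨p⟩ "offense" "" == winner) = true
      · rw [List.foldl_cons, if_pos hR, if_pos hW, ih]
        simp [hR, hW, Prod.ext_iff]
        omega
      · rw [List.foldl_cons, if_pos hR, if_neg hW, ih]
        simp [hR, hW, Prod.ext_iff]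
        omega
    · rw [List.foldl_cons, if_neg hR, ih]
      simp [hR]

-- ===== VERDICT (by name: the statement is the Claim_ definition above) =====
theorem get_rush_plays_spec : Claim_equal_get_rush_plays := by
  intro plays winner loser _ _
  unfold Spec_get_rush_plays get_rush_plays get_rush_plays_alt
  rw [get_rush_plays_fold winner plays 0 0]
  simp
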